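-- pv_equiv track=rewrite | github.com/cabreraem/bidding-languages | simulation.py | create_items
-- ===== SOURCE A (Python) =====
-- def create_items(num_items):
--     """Given a number of items, creates a list of unique strings naming each item."""
--     items = []
--     x = 0
--     for i in range(num_items):
--         if i < 26:
--             items.append(chr(ord('A') + i))
--         elif i < 52:
--             items.append(chr(ord('a') + (i%26)))
--         else:
--             items.append(chr(ord('A') + (i%26))+ str(x))
--             x += 1
--     return items
-- ===== SOURCE B (Python) =====
-- def create_items(num_items):
--     """Given a number of items, creates a list of unique strings naming each item."""
--     def names():
--         # lazy infinite stream of item names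
--         for c in range(ord('A'), ord('Z') + 1):
--             yield chr(c)
--         for c in range(ord('a'), ord('z') + 1):
--             yield chr(c)
--         x = 0
--         while True:
--             yield chr(ord('A') + x % 26) + str(x)
--             x += 1
--     g = names()
--     return [next(g) for _ in range(num_items)]
-- ===== Notes on version B (the rewrite author's own statement) =====
-- stated objective: alternative
-- what changed: Replaces the single indexed loop with three branches and a counter x by a lazy infinite generator of names (two letter phases followed by an unbounded suffixed phase) from which the first num_items elements are taken.
import Mathlib
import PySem

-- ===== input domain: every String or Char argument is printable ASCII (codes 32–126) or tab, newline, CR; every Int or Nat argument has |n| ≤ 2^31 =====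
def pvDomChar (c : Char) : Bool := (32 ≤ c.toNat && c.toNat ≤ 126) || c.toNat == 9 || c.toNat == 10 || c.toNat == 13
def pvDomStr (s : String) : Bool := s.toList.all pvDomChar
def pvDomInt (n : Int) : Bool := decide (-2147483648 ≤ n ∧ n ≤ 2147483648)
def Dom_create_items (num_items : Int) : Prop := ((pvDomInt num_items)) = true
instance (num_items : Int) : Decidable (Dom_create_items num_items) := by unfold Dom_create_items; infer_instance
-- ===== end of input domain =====

-- B replaces A's branched indexed loop by a lazy infinite generator of names consumed
-- by taking the first num_items elements (objective: alternative decomposition).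

-- chr(n) for 0 ≤ n < 128 (the only uses here); exact on that range.
def pvChr (n : Int) : Char := Char.ofNat n.toNat

-- ===== PORT A =====
-- the body of A's for-loop, on the state (items, x)
def pvStepA (st : List String × Int) (i : Int) : List String × Int :=
  if i < 26 then (st.1 ++ [String.ofList [pvChr (65 + i)]], st.2)
  else if i < 52 then (st.1 ++ [String.ofList [pvChr (97 + PySem.Int.mod i 26)]], st.2)
  else (st.1 ++ [String.ofList [pvChr (65 + PySem.Int.mod i 26)] ++ PySem.Int.toStr st.2], st.2 + 1)

def create_items (num_items : Int) : List String :=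
  ((PySem.List.pyRange 0 num_items 1).foldl pvStepA ([], 0)).1

-- ===== PORT B =====
-- the generator's tail phase: yield chr(65 + x%26) + str(x)
def pvName (x : Int) : String :=
  String.ofList [pvChr (65 + PySem.Int.mod x 26)] ++ PySem.Int.toStr x

-- the names the generator yields before entering the infinite while-loop
def pvLetters : List String :=
  (PySem.List.pyRange 65 91 1).map (fun c => String.ofList [pvChr c])
  ++ (PySem.List.pyRange 97 123 1).map (fun c => String.ofList [pvChr c])

-- take n elements from the generator: first drain the pending letter list, then
-- run the while-loop with its counter x
def pvTake : Nat → List String → Int → List String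
  | 0, _, _ => []
  | Nat.succ n, s :: rest, x => s :: pvTake n rest x
  | Nat.succ n, [], x => pvName x :: pvTake n [] (x + 1)

def create_items_alt (num_items : Int) : List String :=
  pvTake num_items.toNat pvLetters 0

-- ===== PRECONDITION & SPEC =====
def Spec_create_items (num_items : Int) (out : List String) : Prop := out = create_items_alt num_items
instance (num_items : Int) (out : List String) : Decidable (Spec_create_items num_items out) := by unfold Spec_create_items; infer_instance

-- ===== CLAIM (what is proved, stated in full; the proofs are below) =====
def Claim_equal_create_items : Prop := ∀ (num_items : Int), Dom_create_items num_items → Spec_create_items num_items (create_items num_items)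

-- ===== LEMMAS AND PROOFS =====

-- taking one more element appends the next name at the end
lemma pvTake_succ (m : Nat) : ∀ (pending : List String) (x : Int),
    pvTake (m + 1) pending x =
      pvTake m pending x ++
        [if m < pending.length then pending.getD m "" else pvName (x + (m : Int) - pending.length)] := by
  induction m with
  | zero =>
      intro pending x
      cases pending with
      | nil => simp [pvTake]
      | cons s rest => simp [pvTake]
  | succ m ih =>
      intro pending x
      cases pending with
      | nil =>
          rw [show pvTake (m + 1 + 1) [] x = pvName x :: pvTake (m + 1) [] (x + 1) from rfl,
              show pvTake (m + 1) [] x = pvName x :: pvTake m [] (x + 1) from rfl,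
              ih [] (x + 1)]
          simp
          congr 1
          ring
      | cons s rest =>
          simp only [pvTake, ih]
          simp only [List.length_cons, List.cons_append, List.cons.injEq, true_and,
                     Nat.add_lt_add_iff_right, List.append_cancel_left_eq]
          simp only [Nat.cast_add, Nat.cast_one, List.getD_cons_succ]
          split_ifs with h
          · exact ⟨rfl, trivial⟩
          · refine ⟨?_, trivial⟩
            congr 1
            ring

lemma pvLetters_len : pvLetters.length = 52 := by decide

lemma pvLetters_get : ∀ m : Nat, m < 52 →
    pvLetters.getD m "" =
      (if (m : Int) < 26 then String.ofList [pvChr (65 + (m : Int))]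
       else String.ofList [pvChr (97 + PySem.Int.mod (m : Int) 26)]) := by
  decide

lemma pvAlt_succ (m : Nat) :
    create_items_alt ((m : Int) + 1) = create_items_alt (m : Int) ++
      [if (m : Int) < 26 then String.ofList [pvChr (65 + (m : Int))]
       else if (m : Int) < 52 then String.ofList [pvChr (97 + PySem.Int.mod (m : Int) 26)]
       else String.ofList [pvChr (65 + PySem.Int.mod (m : Int) 26)] ++ PySem.Int.toStr ((m : Int) - 52)] := by
  unfold create_items_alt
  rw [show ((m : Int) + 1).toNat = m + 1 by omega, show ((m : Int)).toNat = m by omega,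
      pvTake_succ]
  rw [pvLetters_len]
  congr 1
  rcases lt_or_ge m 52 with h | h
  · rw [if_pos h, pvLetters_get m h]
    rcases lt_or_ge m 26 with h1 | h1
    · simp [show (m : Int) < 26 by omega]
    · simp [show ¬ (m : Int) < 26 by omega, show (m : Int) < 52 by omega]
  · rw [if_neg (by omega),
        if_neg (show ¬ (m : Int) < 26 by omega), if_neg (show ¬ (m : Int) < 52 by omega)]
    unfold pvName
    push_cast
    have h26 : (0 : Int) < 26 := by norm_num
    rw [PySem.Int.mod_eq_emod_of_pos h26, PySem.Int.mod_eq_emod_of_pos h26,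
        show (0 + (m : Int) - 52) % 26 = (m : Int) % 26 by omega,
        show (0 + (m : Int) - 52) = (m : Int) - 52 by ring]

lemma pvLoop (m : Nat) :
    (PySem.List.pyRange 0 (m : Int) 1).foldl pvStepA ([], 0) =
      (create_items_alt (m : Int), if (m : Int) ≤ 52 then 0 else (m : Int) - 52) := by
  induction m with
  | zero =>
      simp only [Nat.cast_zero]
      rw [PySem.List.pyRange_one_eq_nil (a := 0) (b := 0) (by omega)]
      unfold create_items_alt
      simp [pvTake]
  | succ m ih =>
      rw [show ((m + 1 : Nat) : Int) = (m : Int) + 1 by push_cast; ring,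
          PySem.List.pyRange_one_succ_right (a := 0) (b := (m : Int)) (by omega),
          List.foldl_append, ih, pvAlt_succ]
      unfold pvStepA
      rcases lt_or_ge (m : Int) 26 with h | h
      · simp [h]; omega
      · rcases lt_or_ge (m : Int) 52 with h2 | h2
        · simp [show ¬ (m : Int) < 26 by omega, h2]
          omega
        · simp [show ¬ (m : Int) < 26 by omega, show ¬ (m : Int) < 52 by omega,
                show (m : Int) ≤ 52 ↔ (m : Int) = 52 by omega]
          rcases eq_or_lt_of_le h2 with h3 | h3
          · simp [← h3]
          · simp [show ¬ (m : Int) = 52 by omega]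
            ring

-- ===== VERDICT (by name: the statement is the Claim_ definition above) =====
theorem create_items_spec : Claim_equal_create_items := by
  intro n _
  unfold Spec_create_items create_items
  rcases lt_or_ge 0 n with h | h
  · have hn : n = (n.toNat : Int) := by omega
    rw [hn, pvLoop]
  · rw [PySem.List.pyRange_one_eq_nil (a := 0) (b := n) (by omega)]
    unfold create_items_alt
    rw [show n.toNat = 0 by omega]
    simp [pvTake]
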